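-- pv_equiv track=rewrite | github.com/pypi-data/pypi-mirror-275 | packages/number2text/number2text-0.0.1.tar.gz/number2text-0.0.1/number2text/lang/fr.py | convert_less_than_hundred
-- ===== SOURCE A (Python) =====
-- _ones= ["", "un", "deux", "trois", "quatre", "cinq", "six", "sept", "huit", "neuf"]
--
-- _teens = ["dix", "onze", "douze", "treize", "quatorze", "quinze", "seize", "dix-sept", "dix-huit", "dix-neuf"]
--
-- _tens = ["", "", "vingt", "trente", "quarante", "cinquante", "soixante", "soixante-dix", "quatre-vingt", "quatre-vingt-dix"]
--
-- def convert_less_than_hundred(number):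
--     if number < 10:
--         return _ones[number]
--     elif number < 20:
--         return _teens[number - 10]
--     elif number < 60:
--         tens, ones = divmod(number, 10)
--         if ones == 0:
--             return _tens[tens]
--         elif tens == 7 or tens == 9:
--             return _tens[tens-1] + "-" + _teens[ones]
--         else:
--             return _tens[tens] + "-" + _ones[ones]
--     elif number < 80:
--         if number == 60:
--             return "soixante"
--         else:
--             return "soixante-" + convert_less_than_hundred(number - 60)
--     else:
--         if number == 80:
--             return "quatre-vingts"
--         else:
--             return "quatre-vingt-" + convert_less_than_hundred(number - 80)
-- ===== SOURCE B (Python) =====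
-- _ones= ["", "un", "deux", "trois", "quatre", "cinq", "six", "sept", "huit", "neuf"]
-- _teens = ["dix", "onze", "douze", "treize", "quatorze", "quinze", "seize", "dix-sept", "dix-huit", "dix-neuf"]
-- _tens = ["", "", "vingt", "trente", "quarante", "cinquante", "soixante", "soixante-dix", "quatre-vingt", "quatre-vingt-dix"]
--
-- def convert_less_than_hundred(number):
--     # Iterative: peel 80s and 60s into an accumulated prefix, then format the remainder < 60.
--     prefix = ""
--     while number >= 60:
--         if number >= 80:
--             if number == 80:
--                 return prefix + "quatre-vingts"
--             prefix += "quatre-vingt-"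
--             number -= 80
--         else:
--             if number == 60:
--                 return prefix + "soixante"
--             prefix += "soixante-"
--             number -= 60
--     if number < 10:
--         return prefix + _ones[number]
--     if number < 20:
--         return prefix + _teens[number - 10]
--     tens, ones = divmod(number, 10)
--     if ones == 0:
--         return prefix + _tens[tens]
--     return prefix + _tens[tens] + "-" + _ones[ones]
-- ===== Notes on version B (the rewrite author's own statement) =====
-- stated objective: alternative
-- what changed: Replaces the tail recursion of the 60-79/80-99 (and >=100) branches by an iterative loop that peels 80s and 60s into an accumulated prefix string, then formats the <60 remainder directly (dropping the then-unreachable tens==7/9 branch).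
import Mathlib
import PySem

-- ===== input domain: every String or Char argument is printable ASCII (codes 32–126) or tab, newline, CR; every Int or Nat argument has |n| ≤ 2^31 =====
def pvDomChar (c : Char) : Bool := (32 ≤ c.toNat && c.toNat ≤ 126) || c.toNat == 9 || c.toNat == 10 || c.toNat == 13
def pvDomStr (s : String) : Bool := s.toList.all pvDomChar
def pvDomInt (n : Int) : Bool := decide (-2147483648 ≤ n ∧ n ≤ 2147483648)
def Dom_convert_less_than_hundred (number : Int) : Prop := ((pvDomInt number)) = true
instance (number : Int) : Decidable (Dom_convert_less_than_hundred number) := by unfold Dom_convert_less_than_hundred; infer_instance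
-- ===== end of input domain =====

-- B replaces the tail recursion of A's 60-79/80-99 branches by an iterative prefix-accumulating
-- loop and drops the then-unreachable tens=7/9 branch of the <60 remainder: an alternative
-- decomposition of the same cost.


-- ===== PORT A =====
def frOnes : List String := ["", "un", "deux", "trois", "quatre", "cinq", "six", "sept", "huit", "neuf"]
def frTeens : List String := ["dix", "onze", "douze", "treize", "quatorze", "quinze", "seize", "dix-sept", "dix-huit", "dix-neuf"]
def frTens : List String := ["", "", "vingt", "trente", "quarante", "cinquante", "soixante", "soixante-dix", "quatre-vingt", "quatre-vingt-dix"]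

def convert_less_than_hundred (number : Int) : String :=
  if number < 10 then PySem.List.pyGetD frOnes number ""
  else if number < 20 then PySem.List.pyGetD frTeens (number - 10) ""
  else if number < 60 then
    let tens := PySem.Int.floordiv number 10
    let ones := PySem.Int.mod number 10
    if ones = 0 then PySem.List.pyGetD frTens tens ""
    else if tens = 7 ∨ tens = 9 then
      PySem.List.pyGetD frTens (tens - 1) "" ++ "-" ++ PySem.List.pyGetD frTeens ones ""
    else
      PySem.List.pyGetD frTens tens "" ++ "-" ++ PySem.List.pyGetD frOnes ones ""
  else if number < 80 then
    if number = 60 then "soixante"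
    else "soixante-" ++ convert_less_than_hundred (number - 60)
  else
    if number = 80 then "quatre-vingts"
    else "quatre-vingt-" ++ convert_less_than_hundred (number - 80)
termination_by number.toNat
decreasing_by all_goals omega

-- ===== PORT B =====
-- the while loop of Source B, as a tail-recursive helper carrying the accumulated prefix
def convertAltLoop (pre : String) (number : Int) : String :=
  if 60 ≤ number then
    if 80 ≤ number then
      if number = 80 then pre ++ "quatre-vingts"
      else convertAltLoop (pre ++ "quatre-vingt-") (number - 80)
    else
      if number = 60 then pre ++ "soixante"
      else convertAltLoop (pre ++ "soixante-") (number - 60)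
  else if number < 10 then pre ++ PySem.List.pyGetD frOnes number ""
  else if number < 20 then pre ++ PySem.List.pyGetD frTeens (number - 10) ""
  else
    let tens := PySem.Int.floordiv number 10
    let ones := PySem.Int.mod number 10
    if ones = 0 then pre ++ PySem.List.pyGetD frTens tens ""
    else pre ++ PySem.List.pyGetD frTens tens "" ++ "-" ++ PySem.List.pyGetD frOnes ones ""
termination_by number.toNat
decreasing_by all_goals omega

def convert_less_than_hundred_alt (number : Int) : String := convertAltLoop "" number

-- ===== PRECONDITION & SPEC =====
-- Pre_ excludes number ≤ -11, where A raises IndexError (_ones[number] out of range even with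
-- Python's negative indexing); B raises there too.
def Pre_convert_less_than_hundred (number : Int) : Prop := -10 ≤ number
instance (number : Int) : Decidable (Pre_convert_less_than_hundred number) := by unfold Pre_convert_less_than_hundred; infer_instance
def pvWitness_convert_less_than_hundred : Int := (61)

def Spec_convert_less_than_hundred (number : Int) (out : String) : Prop := out = convert_less_than_hundred_alt number
instance (number : Int) (out : String) : Decidable (Spec_convert_less_than_hundred number out) := by unfold Spec_convert_less_than_hundred; infer_instance

-- ===== CLAIM (what is proved, stated in full; the proofs are below) =====
def Claim_equal_convert_less_than_hundred : Prop := ∀ (number : Int), Dom_convert_less_than_hundred number → Pre_convert_less_than_hundred number → Spec_convert_less_than_hundred number (convert_less_than_hundred number)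

-- ===== LEMMAS AND PROOFS =====

-- Base case (number < 60): the loop takes no iteration and B's remainder formatting agrees with
-- A's (the tens=7/9 branch of A never fires there, since tens = number // 10 ≤ 5).
lemma convertAltLoop_base (pre : String) (n : Int) (h0 : -10 ≤ n) (h : n < 60) :
    convertAltLoop pre n = pre ++ convert_less_than_hundred n := by
  rw [convertAltLoop, convert_less_than_hundred]
  have h60 : ¬ (60 : Int) ≤ n := by omega
  by_cases h10 : n < 10
  · simp [h10, h60]
  · by_cases h20 : n < 20
    · simp [h10, h20, h60]
    · have ht : PySem.Int.floordiv n 10 = n / 10 := PySem.Int.floordiv_eq_ediv_of_pos (by omega)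
      have h79 : ¬ (n / 10 = 7 ∨ n / 10 = 9) := by omega
      by_cases hd : (10 : Int) ∣ n
      · simp [h10, h20, h, h60, hd]
      · simp [h10, h20, h, h60, hd, h79, String.append_assoc]

lemma convertAltLoop_eq (k : Nat) : ∀ (n : Int), n.toNat ≤ k → -10 ≤ n → ∀ (pre : String),
    convertAltLoop pre n = pre ++ convert_less_than_hundred n := by
  induction k with
  | zero =>
    intro n hk h0 pre
    exact convertAltLoop_base pre n h0 (by omega)
  | succ k ih =>
    intro n hk h0 pre
    by_cases h60 : n < 60
    · exact convertAltLoop_base pre n h0 h60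
    · rw [convertAltLoop, convert_less_than_hundred]
      have hge : (60 : Int) ≤ n := by omega
      have hn10 : ¬ n < 10 := by omega
      have hn20 : ¬ n < 20 := by omega
      by_cases h80 : 80 ≤ n
      · have hn80 : ¬ n < 80 := by omega
        by_cases he : n = 80
        · simp [he]
        · simp [hge, h80, he, hn10, hn20, h60, hn80]
          rw [ih (n - 80) (by omega) (by omega)]
          rw [String.append_assoc]
      · have hl80 : n < 80 := by omega
        by_cases he : n = 60
        · simp [he]
        · simp [hge, h80, he, hn10, hn20, h60, hl80]
          rw [ih (n - 60) (by omega) (by omega)]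
          rw [String.append_assoc]

-- ===== VERDICT (by name: the statement is the Claim_ definition above) =====
theorem convert_less_than_hundred_spec : Claim_equal_convert_less_than_hundred := by
  intro n _ hpre
  unfold Spec_convert_less_than_hundred convert_less_than_hundred_alt
  rw [convertAltLoop_eq n.toNat n le_rfl hpre ""]
  simp
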